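-- pv_equiv track=rewrite | github.com/LoftiestLoki07/bearbuddy | bear_listener.py | looks_like_wakeword
-- ===== SOURCE A (Python) =====
-- WAKEWORDS = ["bear", "hello bear", "hey bear"]
--
-- def looks_like_wakeword(text: str) -> bool:
--     t = text.lower().strip()
--     if not t:
--         return False
--
--     # exact matches
--     for w in WAKEWORDS:
--         if t == w:
--             return True
--
--     # short phrases that include the word bear
--     if "bear" in t and len(t.split()) <= 4:
--         return True
--
--     return False
-- ===== SOURCE B (Python) =====
-- def looks_like_wakeword(text: str) -> bool:
--     t = text.lower().strip()
--     return "bear" in t and len(t.split()) <= 4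
-- ===== Notes on version B (the rewrite author's own statement) =====
-- stated objective: simpler
-- what changed: Drops the exact-match loop over WAKEWORDS and the empty-string guard (both redundant: every wakeword contains 'bear' with at most 4 words, and 'bear' in '' is False), returning a single predicate with no loop or branches.
import Mathlib
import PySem

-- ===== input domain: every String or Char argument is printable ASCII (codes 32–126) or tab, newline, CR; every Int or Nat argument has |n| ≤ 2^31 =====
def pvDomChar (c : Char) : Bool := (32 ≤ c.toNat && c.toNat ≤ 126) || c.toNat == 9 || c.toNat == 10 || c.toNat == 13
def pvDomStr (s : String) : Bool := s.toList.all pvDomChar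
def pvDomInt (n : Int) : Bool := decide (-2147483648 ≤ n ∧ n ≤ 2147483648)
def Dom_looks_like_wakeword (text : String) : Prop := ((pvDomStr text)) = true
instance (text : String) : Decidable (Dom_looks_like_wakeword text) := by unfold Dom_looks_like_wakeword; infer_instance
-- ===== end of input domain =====

-- B drops A's exact-match loop over WAKEWORDS and the empty-string guard (both redundant)
-- and returns the single predicate "bear" in t and len(t.split()) <= 4: simpler, no loop.


-- ===== PORT A =====
def pvWAKEWORDS : List String := ["bear", "hello bear", "hey bear"]

def looks_like_wakeword (text : String) : Bool :=
  let t := PySem.Str.strip (PySem.Str.lower text)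
  if t == "" then false
  else if pvWAKEWORDS.any (fun w => t == w) then true  -- the early-return loop
  else if PySem.Str.isIn "bear" t && decide ((PySem.Str.split₀ t).length ≤ 4) then true
  else false

-- ===== PORT B =====
def looks_like_wakeword_alt (text : String) : Bool :=
  let t := PySem.Str.strip (PySem.Str.lower text)
  PySem.Str.isIn "bear" t && decide ((PySem.Str.split₀ t).length ≤ 4)

-- ===== PRECONDITION & SPEC =====
def Spec_looks_like_wakeword (text : String) (out : Bool) : Prop := out = looks_like_wakeword_alt text
instance (text : String) (out : Bool) : Decidable (Spec_looks_like_wakeword text out) := by unfold Spec_looks_like_wakeword; infer_instance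

-- ===== CLAIM (what is proved, stated in full; the proofs are below) =====
def Claim_equal_looks_like_wakeword : Prop := ∀ (text : String), Dom_looks_like_wakeword text → Spec_looks_like_wakeword text (looks_like_wakeword text)

-- ===== LEMMAS AND PROOFS =====
-- A's body and B's body agree for EVERY stripped-lowered string t: the empty guard and the
-- exact-match loop are redundant because the predicate is already true on each wakeword.
theorem pv_body_eq (t : String) :
    (if t == "" then false
     else if pvWAKEWORDS.any (fun w => t == w) then true
     else if PySem.Str.isIn "bear" t && decide ((PySem.Str.split₀ t).length ≤ 4) then true
     else false)
    = (PySem.Str.isIn "bear" t && decide ((PySem.Str.split₀ t).length ≤ 4)) := by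
  by_cases h0 : t = ""
  · subst h0; decide
  · by_cases h1 : t = "bear"
    · subst h1; decide
    · by_cases h2 : t = "hello bear"
      · subst h2; decide
      · by_cases h3 : t = "hey bear"
        · subst h3; decide
        · simp [pvWAKEWORDS, h0, h1, h2, h3]

-- ===== VERDICT (by name: the statement is the Claim_ definition above) =====
theorem looks_like_wakeword_spec : Claim_equal_looks_like_wakeword := by
  intro text _
  unfold Spec_looks_like_wakeword looks_like_wakeword looks_like_wakeword_alt
  exact pv_body_eq _
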